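-- pv_equiv track=rewrite | github.com/jiyuzh/hashfs-strata | graphing/IDXDataObject.py | filter_configs
-- ===== SOURCE A (Python) =====
-- import copy
--
-- def filter_configs(config_filter, dfs):
--     assert config_filter is not None
--     new_dfs = copy.deepcopy(dfs)
--     for bench in [k for k in dfs]:
--         for config in [x for x in dfs[bench]]:
--             matches_any = False
--             for c in config_filter:
--                 if c == config:
--                     matches_any = True
--                     break
--             if not matches_any:
--                 new_dfs[bench].pop(config, None)
--
--     return new_dfs
-- ===== SOURCE B (Python) =====
-- import copy
--
-- def filter_configs(config_filter, dfs):
--     assert config_filter is not None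
--     return {bench: {cfg: copy.deepcopy(df) for cfg, df in configs.items()
--                     if cfg in config_filter}
--             for bench, configs in dfs.items()}
-- ===== Notes on version B (the rewrite author's own statement) =====
-- stated objective: simpler
-- what changed: Inverts copy-everything-then-pop-rejected into a single dict comprehension that builds only the accepted configs (copying each kept dataframe individually), with no mutation pass.
import Mathlib
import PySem

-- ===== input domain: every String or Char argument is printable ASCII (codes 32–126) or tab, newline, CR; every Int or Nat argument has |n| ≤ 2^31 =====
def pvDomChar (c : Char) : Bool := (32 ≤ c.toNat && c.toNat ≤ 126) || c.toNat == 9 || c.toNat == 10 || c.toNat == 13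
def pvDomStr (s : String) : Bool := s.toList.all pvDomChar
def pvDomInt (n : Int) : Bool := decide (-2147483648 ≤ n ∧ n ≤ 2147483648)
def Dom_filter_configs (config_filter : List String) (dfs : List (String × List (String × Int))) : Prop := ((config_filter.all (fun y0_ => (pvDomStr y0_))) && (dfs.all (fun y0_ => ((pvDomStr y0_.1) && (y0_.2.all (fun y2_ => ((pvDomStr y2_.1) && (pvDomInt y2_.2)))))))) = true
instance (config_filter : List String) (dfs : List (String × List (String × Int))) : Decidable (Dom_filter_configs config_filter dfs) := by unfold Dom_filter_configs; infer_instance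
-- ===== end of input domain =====

-- B replaces A's deepcopy-then-pop-rejected mutation pass by directly building the dict of accepted configs (simpler decomposition; return values proved equal).

-- ===== PORT A =====
-- the inner `for c in config_filter: if c == config: matches_any = True; break` loop
def pvMatchesAny (config_filter : List String) (config : String) : Bool :=
  match config_filter with
  | [] => false
  | c :: rest => if c == config then true else pvMatchesAny rest config

-- `new_dfs[bench].pop(config, None)`: remove the first pair with this key (no-op if absent)
def pvPopKey (xs : List (String × Int)) (config : String) : List (String × Int) :=
  match xs with
  | [] => []
  | (k, v) :: rest => if k == config then rest else (k, v) :: pvPopKey rest config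

def filter_configs (config_filter : List String) (dfs : List (String × List (String × Int))) : List (String × List (String × Int)) :=
  -- new_dfs = copy.deepcopy(dfs); then for each bench, pop every non-matching config from its copy
  dfs.map (fun bc =>
    (bc.1, bc.2.foldl (fun acc cd =>
        if pvMatchesAny config_filter cd.1 then acc else pvPopKey acc cd.1) bc.2))

-- ===== PORT B =====
def filter_configs_alt (config_filter : List String) (dfs : List (String × List (String × Int))) : List (String × List (String × Int)) :=
  dfs.map (fun bc => (bc.1, bc.2.filter (fun cd => config_filter.contains cd.1)))

-- ===== PRECONDITION & SPEC =====
def Spec_filter_configs (config_filter : List String) (dfs : List (String × List (String × Int))) (out : List (String × List (String × Int))) : Prop := out = filter_configs_alt config_filter dfs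
instance (config_filter : List String) (dfs : List (String × List (String × Int))) (out : List (String × List (String × Int))) : Decidable (Spec_filter_configs config_filter dfs out) := by unfold Spec_filter_configs; infer_instance

-- ===== CLAIM (what is proved, stated in full; the proofs are below) =====
def Claim_equal_filter_configs : Prop := ∀ (config_filter : List String) (dfs : List (String × List (String × Int))), Dom_filter_configs config_filter dfs → Spec_filter_configs config_filter dfs (filter_configs config_filter dfs)

-- ===== LEMMAS AND PROOFS =====

theorem pvMatchesAny_eq_contains (cf : List String) (c : String) :
    pvMatchesAny cf c = cf.contains c := by
  induction cf with
  | nil => rfl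
  | cons x rest ih =>
    simp only [pvMatchesAny, ih, List.contains_cons]
    by_cases h : x = c
    · simp [h]
    · simp [h, Ne.symm h]

theorem pvPopKey_append (kept rest : List (String × Int)) (c : String) (v : Int)
    (h : ∀ p ∈ kept, p.1 ≠ c) :
    pvPopKey (kept ++ (c, v) :: rest) c = kept ++ rest := by
  induction kept with
  | nil => simp [pvPopKey]
  | cons p kept ih =>
    obtain ⟨k, w⟩ := p
    have hk : k ≠ c := h (k, w) (by simp)
    simp only [List.cons_append, pvPopKey, beq_iff_eq, if_neg hk]
    exact congrArg _ (ih (fun q hq => h q (by simp [hq])))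

-- loop invariant: processed-and-kept prefix (all matching) ++ unprocessed suffix
theorem pvFold_filter (cf : List String) (xs kept : List (String × Int))
    (h : ∀ p ∈ kept, pvMatchesAny cf p.1 = true) :
    List.foldl (fun acc cd => if pvMatchesAny cf cd.1 then acc else pvPopKey acc cd.1)
        (kept ++ xs) xs
      = kept ++ xs.filter (fun cd => cf.contains cd.1) := by
  induction xs generalizing kept with
  | nil => simp
  | cons p xs ih =>
    obtain ⟨c, v⟩ := p
    by_cases hm : pvMatchesAny cf c = true
    · have h' : ∀ q ∈ kept ++ [(c, v)], pvMatchesAny cf q.1 = true := by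
        intro q hq
        rcases List.mem_append.mp hq with hq | hq
        · exact h q hq
        · simp at hq; subst hq; exact hm
      have := ih (kept ++ [(c, v)]) h'
      simp only [List.append_assoc, List.singleton_append] at this
      have hc : c ∈ cf := by
        have := pvMatchesAny_eq_contains cf c
        rw [this] at hm; simpa using hm
      simpa [List.foldl_cons, hm, List.filter_cons, hc] using this
    · have hne : ∀ q ∈ kept, q.1 ≠ c := by
        intro q hq hEq
        exact hm (hEq ▸ h q hq)
      have hpop := pvPopKey_append kept xs c v hne
      have := ih kept h
      simp only [List.foldl_cons, if_neg hm, hpop]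
      have hc : c ∉ cf := by
        have := pvMatchesAny_eq_contains cf c
        rw [this] at hm; simpa using hm
      simpa [List.filter_cons, hc] using this

-- ===== VERDICT (by name: the statement is the Claim_ definition above) =====
theorem filter_configs_spec : Claim_equal_filter_configs := by
  intro cf dfs _
  unfold Spec_filter_configs filter_configs filter_configs_alt
  refine List.map_congr_left (fun bc _ => ?_)
  have := pvFold_filter cf bc.2 [] (by simp)
  simpa using this
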